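-- pv_equiv track=rewrite | github.com/exodojaffar/gerador-de-gabarito | main.py | comparar_respostas
-- ===== SOURCE A (Python) =====
-- N_QUESTOES = 20
--
-- def comparar_respostas(respostas_1:list, respostas_2: list):
-- 	diff_index = list()
-- 	c_iguais = int()
--
-- 	for (resposta_1, resposta_2, i) in zip(respostas_1, respostas_2, range(N_QUESTOES)):
-- 		if resposta_1 == resposta_2:
-- 			c_iguais += 1
-- 		else:
-- 			diff_index.append(i)
--
-- 		pass
--
-- 	return (diff_index, c_iguais)
-- ===== SOURCE B (Python) =====
-- N_QUESTOES = 20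
--
-- def comparar_respostas(respostas_1: list, respostas_2: list):
-- 	def go(i):
-- 		if i >= N_QUESTOES or i >= len(respostas_1) or i >= len(respostas_2):
-- 			return ([], 0)
-- 		diff_index, c_iguais = go(i + 1)
-- 		if respostas_1[i] == respostas_2[i]:
-- 			return (diff_index, c_iguais + 1)
-- 		return ([i] + diff_index, c_iguais)
-- 	return go(0)
-- ===== Notes on version B (the rewrite author's own statement) =====
-- stated objective: alternative
-- what changed: Replaces the forward foldl over the zipped lists with an index-based recursive descent that recurses first and builds both the mismatch-index list (by consing, back-to-front) and the match count on the way out of the recursion.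
import Mathlib
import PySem

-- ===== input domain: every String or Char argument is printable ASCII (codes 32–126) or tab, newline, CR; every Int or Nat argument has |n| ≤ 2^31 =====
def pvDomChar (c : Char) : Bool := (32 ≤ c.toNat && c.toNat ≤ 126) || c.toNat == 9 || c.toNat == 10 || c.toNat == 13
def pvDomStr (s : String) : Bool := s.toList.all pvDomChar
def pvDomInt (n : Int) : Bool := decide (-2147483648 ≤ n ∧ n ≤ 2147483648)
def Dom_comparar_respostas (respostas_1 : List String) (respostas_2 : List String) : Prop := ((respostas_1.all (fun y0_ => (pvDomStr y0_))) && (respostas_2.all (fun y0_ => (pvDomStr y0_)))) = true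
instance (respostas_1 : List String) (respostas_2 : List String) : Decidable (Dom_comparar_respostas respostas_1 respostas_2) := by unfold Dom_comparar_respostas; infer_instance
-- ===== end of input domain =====

-- B replaces A's forward accumulator loop with an index-based recursive descent that builds the
-- mismatch list and match count on the way out of the recursion (objective: alternative).

-- ===== PORT A =====
-- zip(respostas_1, respostas_2, range(N_QUESTOES)) = the zipped pairs with their index, cut at 20.
def comparar_respostas (respostas_1 : List String) (respostas_2 : List String) : List Int × Int :=
  (PySem.List.enumerate ((respostas_1.zip respostas_2).take 20)).foldl
    (fun (st : List Int × Int) (p : Int × (String × String)) =>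
      if p.2.1 == p.2.2 then (st.1, st.2 + 1) else (st.1 ++ [p.1], st.2))
    ([], 0)

-- ===== PORT B =====
-- go(i) from Source B: recurse to i+1 first, then cons the index / bump the count on the way out.
def cmpGo (respostas_1 : List String) (respostas_2 : List String) (i : Nat) : List Int × Int :=
  if h : 20 ≤ i ∨ respostas_1.length ≤ i ∨ respostas_2.length ≤ i then ([], 0)
  else
    have h1 : i < respostas_1.length := by omega
    have h2 : i < respostas_2.length := by omega
    let p := cmpGo respostas_1 respostas_2 (i + 1)
    if respostas_1[i] == respostas_2[i] then (p.1, p.2 + 1)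
    else ((i : Int) :: p.1, p.2)
termination_by 20 - i
decreasing_by omega

def comparar_respostas_alt (respostas_1 : List String) (respostas_2 : List String) : List Int × Int :=
  cmpGo respostas_1 respostas_2 0

-- ===== PRECONDITION & SPEC =====
def Spec_comparar_respostas (respostas_1 : List String) (respostas_2 : List String) (out : List Int × Int) : Prop := out = comparar_respostas_alt respostas_1 respostas_2
instance (respostas_1 : List String) (respostas_2 : List String) (out : List Int × Int) : Decidable (Spec_comparar_respostas respostas_1 respostas_2 out) := by unfold Spec_comparar_respostas; infer_instance

-- ===== CLAIM (what is proved, stated in full; the proofs are below) =====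
def Claim_equal_comparar_respostas : Prop := ∀ (respostas_1 : List String) (respostas_2 : List String), Dom_comparar_respostas respostas_1 respostas_2 → Spec_comparar_respostas respostas_1 respostas_2 (comparar_respostas respostas_1 respostas_2)

-- ===== LEMMAS AND PROOFS =====

-- Proof-only abstraction of B's recursion over the remaining suffix of pairs.
def Gfun : List (String × String) → Int → List Int × Int
  | [], _ => ([], 0)
  | (a, b) :: t, s =>
    let p := Gfun t (s + 1)
    if a == b then (p.1, p.2 + 1) else (s :: p.1, p.2)

-- A's loop over any enumerated pair list, in closed form.
theorem loopA_eq (l : List (String × String)) : ∀ (s : Int) (d : List Int) (c : Int),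
    (PySem.List.enumerate l s).foldl
      (fun (st : List Int × Int) (p : Int × (String × String)) =>
        if p.2.1 == p.2.2 then (st.1, st.2 + 1) else (st.1 ++ [p.1], st.2)) (d, c)
    = (d ++ ((PySem.List.enumerate l s).filter (fun p => !(p.2.1 == p.2.2))).map (fun p => p.1),
       c + ((l.length : Int) - (((PySem.List.enumerate l s).filter (fun p => !(p.2.1 == p.2.2))).length : Int))) := by
  induction l with
  | nil => intro s d c; simp [PySem.List.enumerate_nil]
  | cons x xs ih =>
    intro s d c
    simp only [PySem.List.enumerate_cons, List.foldl_cons, List.filter_cons]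
    by_cases hx : x.1 = x.2
    · simp only [hx, beq_self_eq_true, Bool.not_true, if_true, Bool.false_eq_true, if_false]
      rw [ih]
      simp only [Prod.mk.injEq, true_and, List.length_cons]
      push_cast
      ring
    · have hb : (x.1 == x.2) = false := beq_eq_false_iff_ne.mpr hx
      simp only [hb, Bool.not_false, if_false, if_true, Bool.false_eq_true]
      rw [ih]
      simp only [Prod.mk.injEq, List.map_cons, List.length_cons, List.append_assoc,
        List.singleton_append, true_and]
      push_cast
      ring

-- Gfun computes the same closed form.
theorem Gfun_eq (l : List (String × String)) : ∀ (s : Int),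
    Gfun l s
    = (((PySem.List.enumerate l s).filter (fun p => !(p.2.1 == p.2.2))).map (fun p => p.1),
       (l.length : Int) - (((PySem.List.enumerate l s).filter (fun p => !(p.2.1 == p.2.2))).length : Int)) := by
  induction l with
  | nil => intro s; simp [Gfun, PySem.List.enumerate_nil]
  | cons x xs ih =>
    intro s
    obtain ⟨a, b⟩ := x
    simp only [Gfun, PySem.List.enumerate_cons, List.filter_cons]
    by_cases hx : a = b
    · simp only [hx, beq_self_eq_true, Bool.not_true, if_true, Bool.false_eq_true, if_false]
      rw [ih]
      simp only [Prod.mk.injEq, true_and, List.length_cons]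
      push_cast
      ring
    · have hb : (a == b) = false := beq_eq_false_iff_ne.mpr hx
      simp only [hb, Bool.not_false, if_false, if_true, Bool.false_eq_true]
      rw [ih]
      simp only [Prod.mk.injEq, List.map_cons, List.length_cons, true_and]
      push_cast
      ring

-- B's recursion at index i equals Gfun over the i-th suffix of the capped zipped list.
theorem cmpGo_eq_Gfun (r1 r2 : List String) : ∀ (n i : Nat), 20 - i ≤ n →
    cmpGo r1 r2 i = Gfun (((r1.zip r2).take 20).drop i) (i : Int) := by
  intro n
  induction n with
  | zero =>
    intro i hi
    have h20 : 20 ≤ i := by omega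
    rw [cmpGo]
    have hl : ((r1.zip r2).take 20).length ≤ 20 := by
      simp [List.length_take]
    have hd : ((r1.zip r2).take 20).drop i = [] :=
      List.drop_eq_nil_of_le (by omega)
    simp [h20, hd, Gfun]
  | succ m ih =>
    intro i hi
    rw [cmpGo]
    by_cases h : 20 ≤ i ∨ r1.length ≤ i ∨ r2.length ≤ i
    · have hl : ((r1.zip r2).take 20).length = min 20 (min r1.length r2.length) := by
        rw [List.length_take, List.length_zip]
      have hd : ((r1.zip r2).take 20).drop i = [] :=
        List.drop_eq_nil_of_le (by omega)
      simp [h, hd, Gfun]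
    · have h1 : i < r1.length := by omega
      have h2 : i < r2.length := by omega
      have h20 : i < 20 := by omega
      simp only [h, dif_neg, not_false_iff]
      have hlen : i < ((r1.zip r2).take 20).length := by
        simp [List.length_take, List.length_zip]; omega
      have hd : ((r1.zip r2).take 20).drop i
          = ((r1.zip r2).take 20)[i] :: ((r1.zip r2).take 20).drop (i + 1) := by
        exact (List.drop_eq_getElem_cons hlen)
      have hget : ((r1.zip r2).take 20)[i] = (r1[i], r2[i]) := by
        simp [List.getElem_take, List.getElem_zip]
      rw [ih (i + 1) (by omega)] at *
      rw [hd, hget]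
      simp only [Gfun]
      push_cast
      rfl

theorem comparar_respostas_eq (respostas_1 respostas_2 : List String) :
    comparar_respostas respostas_1 respostas_2 = comparar_respostas_alt respostas_1 respostas_2 := by
  unfold comparar_respostas comparar_respostas_alt
  rw [loopA_eq, cmpGo_eq_Gfun respostas_1 respostas_2 20 0 (by omega)]
  rw [List.drop_zero, Gfun_eq]
  simp

-- ===== VERDICT (by name: the statement is the Claim_ definition above) =====
theorem comparar_respostas_spec : Claim_equal_comparar_respostas := by
  intro r1 r2 _
  exact comparar_respostas_eq r1 r2
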